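-- pv_equiv track=rewrite | github.com/scharlesu/thenbalog_data | depth.py | name_formater
-- ===== SOURCE A (Python) =====
-- def name_formater(string):
--   for i in range(10):
--     string = string.replace(str(i),"")
--   string = string.replace("\n\n#","")
--   if(string == "\xa0"):
--     return " "
--   if(string == "Bruce Brown, Jr."):
--     return "Bruce Brown"
--   return string
-- ===== SOURCE B (Python) =====
-- def name_formater(string):
--   kept = [c for c in string if c not in '0123456789']
--   out = []
--   i = 0
--   while i < len(kept):
--     if kept[i:i+3] == ['\n', '\n', '#']:
--       i += 3
--     else:
--       out.append(kept[i])
--       i += 1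
--   s = ''.join(out)
--   return {'\xa0': ' ', 'Bruce Brown, Jr.': 'Bruce Brown'}.get(s, s)
-- ===== Notes on version B (the rewrite author's own statement) =====
-- stated objective: alternative
-- what changed: A's ten whole-string str.replace passes plus another replace pass and an if-chain become one comprehension filter dropping digit characters, one explicit index/while scan that skips '\n\n#' occurrences, and a dict lookup with default for the two special-case names.
import Mathlib
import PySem

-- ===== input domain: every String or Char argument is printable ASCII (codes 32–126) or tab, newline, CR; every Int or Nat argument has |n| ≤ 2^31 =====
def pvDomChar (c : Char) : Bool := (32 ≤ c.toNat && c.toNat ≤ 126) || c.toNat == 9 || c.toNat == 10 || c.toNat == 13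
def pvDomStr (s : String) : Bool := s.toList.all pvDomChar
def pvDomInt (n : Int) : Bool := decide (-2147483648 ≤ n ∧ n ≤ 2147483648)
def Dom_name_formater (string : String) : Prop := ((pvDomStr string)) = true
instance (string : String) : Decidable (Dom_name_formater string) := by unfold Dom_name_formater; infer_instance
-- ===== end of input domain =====

-- B (objective: alternative) replaces A's ten per-digit str.replace passes, the "\n\n#" replace
-- pass and the if-chain by one digit-dropping filter, one explicit index scan skipping "\n\n#",
-- and a dict lookup with default for the two special cases.

-- ===== PORT A =====
-- for i in range(10): string = string.replace(str(i), "")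
-- then string = string.replace("\n\n#", ""), then the two equality special cases.
def name_formater (string : String) : String :=
  let s1 := (PySem.List.pyRange 0 10 1).foldl
      (fun s i => PySem.Str.replace s (PySem.Int.toStr i) "") string
  let s2 := PySem.Str.replace s1 "\n\n#" ""
  if s2 = "\u00A0" then " "
  else if s2 = "Bruce Brown, Jr." then "Bruce Brown"
  else s2

-- ===== PORT B =====
-- the while loop: at each index, if the next three chars are "\n\n#" skip them, else keep one
def stripScan (l : List Char) : List Char :=
  match l with
  | [] => []
  | c :: t =>
    if ['\n', '\n', '#'].isPrefixOf (c :: t) then stripScan (t.drop 2)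
    else c :: stripScan t
termination_by l.length
decreasing_by
  · simp only [List.length_drop, List.length_cons]; omega
  · simp

-- kept = [c for c in string if c not in '0123456789']; the while loop; the dict .get(s, s)
def name_formater_alt (string : String) : String :=
  let kept := string.toList.filter (fun c => !("0123456789".toList.contains c))
  let s := String.ofList (stripScan kept)
  PySem.Dict.getD
    (PySem.Dict.ofList [("\u00A0", " "), ("Bruce Brown, Jr.", "Bruce Brown")]) s s

-- ===== PRECONDITION & SPEC =====
def Spec_name_formater (string : String) (out : String) : Prop := out = name_formater_alt string
instance (string : String) (out : String) : Decidable (Spec_name_formater string out) := by unfold Spec_name_formater; infer_instance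

-- ===== CLAIM (what is proved, stated in full; the proofs are below) =====
def Claim_equal_name_formater : Prop := ∀ (string : String), Dom_name_formater string → Spec_name_formater string (name_formater string)

-- ===== LEMMAS AND PROOFS =====

-- replace.go with a single-character pattern and empty replacement drops exactly that character
lemma replace_go_single (d : Char) : ∀ (fuel : Nat) (l acc : List Char), l.length ≤ fuel →
    PySem.Chars.replace.go [d] [] fuel l acc = acc.reverse ++ l.filter (· != d) := by
  intro fuel
  induction fuel with
  | zero => intro l acc h; simp at h; subst h; simp [PySem.Chars.replace.go]
  | succ n ih =>
    intro l acc h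
    cases l with
    | nil => simp [PySem.Chars.replace.go]
    | cons c t =>
      simp only [PySem.Chars.replace.go, List.isPrefixOf, List.filter]
      by_cases hc : d = c
      · subst hc
        simp only [beq_self_eq_true, Bool.and_true]
        rw [ih]
        · simp
        · simpa using Nat.le_of_succ_le_succ h
      · have : (d == c) = false := by simp [hc]
        simp only [this]
        rw [ih t (c :: acc) (by simpa using Nat.le_of_succ_le_succ h)]
        have : (c != d) = true := by simp [bne]; exact fun e => hc e.symm
        simp [this]

-- s.replace(single char d, "") = filter (· ≠ d)
lemma replace_single (cs : List Char) (d : Char) :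
    PySem.Chars.replace cs [d] [] = cs.filter (· != d) := by
  rw [PySem.Chars.replace]
  simp [replace_go_single d cs.length cs [] (le_refl _)]

-- A's digit-removal loop equals B's single filter pass
lemma loop_eq (string : String) :
    (PySem.List.pyRange 0 10 1).foldl
      (fun s i => PySem.Str.replace s (PySem.Int.toStr i) "") string
    = String.ofList (string.toList.filter (fun c => !("0123456789".toList.contains c))) := by
  have hr : PySem.List.pyRange 0 10 1 = [0,1,2,3,4,5,6,7,8,9] := by decide
  rw [hr]
  simp only [List.foldl]
  apply String.toList_injective
  simp only [PySem.Str.toList_replace, PySem.Int.toList_toStr]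
  have h0 : PySem.Int.toChars 0 = ['0'] := by decide
  have h1 : PySem.Int.toChars 1 = ['1'] := by decide
  have h2 : PySem.Int.toChars 2 = ['2'] := by decide
  have h3 : PySem.Int.toChars 3 = ['3'] := by decide
  have h4 : PySem.Int.toChars 4 = ['4'] := by decide
  have h5 : PySem.Int.toChars 5 = ['5'] := by decide
  have h6 : PySem.Int.toChars 6 = ['6'] := by decide
  have h7 : PySem.Int.toChars 7 = ['7'] := by decide
  have h8 : PySem.Int.toChars 8 = ['8'] := by decide
  have h9 : PySem.Int.toChars 9 = ['9'] := by decide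
  rw [h0, h1, h2, h3, h4, h5, h6, h7, h8, h9]
  have he : ("" : String).toList = [] := rfl
  rw [he]
  rw [replace_single, replace_single, replace_single, replace_single, replace_single,
      replace_single, replace_single, replace_single, replace_single, replace_single]
  simp only [List.filter_filter, String.toList_ofList]
  apply List.filter_congr
  intro c _
  have hds : "0123456789".toList = ['0','1','2','3','4','5','6','7','8','9'] := rfl
  simp only [hds, List.contains_cons, List.contains_nil, bne, Bool.beq_eq_decide_eq,
    Bool.not_or, Bool.or_false]
  simp only [Bool.and_comm, Bool.and_assoc]

-- replace.go with pattern "\n\n#" and empty replacement is exactly B's scan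
lemma replace_go_pat : ∀ (fuel : Nat) (l acc : List Char), l.length ≤ fuel →
    PySem.Chars.replace.go ['\n', '\n', '#'] [] fuel l acc = acc.reverse ++ stripScan l := by
  intro fuel
  induction fuel with
  | zero => intro l acc h; simp at h; subst h; simp [PySem.Chars.replace.go, stripScan]
  | succ n ih =>
    intro l acc h
    cases l with
    | nil => simp [PySem.Chars.replace.go, stripScan]
    | cons c t =>
      rw [stripScan]
      simp only [PySem.Chars.replace.go]
      by_cases hp : ['\n', '\n', '#'].isPrefixOf (c :: t) = true
      · rw [if_pos hp, if_pos hp]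
        have hlen : (t.drop 2).length ≤ n := by
          have := Nat.le_of_succ_le_succ h
          simp only [List.length_drop, List.length_cons] at *
          omega
        have hd : List.drop (['\n', '\n', '#'] : List Char).length (c :: t) = t.drop 2 := by simp
        rw [hd, show (([] : List Char).reverse ++ acc) = acc from by simp,
            ih (t.drop 2) acc hlen]
      · rw [if_neg hp, if_neg hp]
        rw [ih t (c :: acc) (by simpa using Nat.le_of_succ_le_succ h)]
        simp

-- the "\n\n#" replace pass equals B's scan
lemma replace_pat (cs : List Char) :
    PySem.Chars.replace cs ['\n', '\n', '#'] [] = stripScan cs := by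
  rw [PySem.Chars.replace]
  simp [replace_go_pat cs.length cs [] (le_refl _)]

-- the two-entry dict .get(s, s) equals A's if-chain
lemma lookup_eq (s : String) :
    PySem.Dict.getD
      (PySem.Dict.ofList [("\u00A0", " "), ("Bruce Brown, Jr.", "Bruce Brown")]) s s
    = if s = "\u00A0" then " " else if s = "Bruce Brown, Jr." then "Bruce Brown" else s := by
  have hof : PySem.Dict.ofList [(("\u00A0" : String), (" " : String)),
      ("Bruce Brown, Jr.", "Bruce Brown")]
      = PySem.Dict.mk [("\u00A0", " "), ("Bruce Brown, Jr.", "Bruce Brown")] := by decide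
  rw [hof]
  simp only [PySem.Dict.getD, PySem.Dict.get?_mk_cons]
  by_cases h1 : s = "\u00A0"
  · simp [h1]
  · by_cases h2 : s = "Bruce Brown, Jr."
    · simp [h2]
    · simp [h1, h2, Ne.symm h1, Ne.symm h2, PySem.Dict.get?]

-- ===== VERDICT (by name: the statement is the Claim_ definition above) =====
theorem name_formater_spec : Claim_equal_name_formater := by
  intro string _
  show name_formater string = name_formater_alt string
  simp only [name_formater, name_formater_alt]
  rw [loop_eq, lookup_eq]
  have h2 : ∀ cs : List Char,
      PySem.Str.replace (String.ofList cs) "\n\n#" "" = String.ofList (stripScan cs) := by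
    intro cs
    apply String.toList_injective
    simp only [PySem.Str.toList_replace, String.toList_ofList]
    rw [show ("\n\n#" : String).toList = ['\n', '\n', '#'] from rfl,
        show ("" : String).toList = [] from rfl, replace_pat]
  rw [h2]
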